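-- pv_equiv track=rewrite | github.com/shiv122/brand-detector-django | apps/services/detection/detection_service.py | _find_nearest_processed_frame
-- ===== SOURCE A (Python) =====
-- def _find_nearest_processed_frame(
--     current_frame: int, processed_frames: list
-- ) -> int:
--     """Find the nearest processed frame"""
--     if not processed_frames:
--         return current_frame
--
--     processed_frames = sorted(processed_frames)
--     nearest = processed_frames[0]
--     min_distance = abs(current_frame - nearest)
--
--     for frame in processed_frames:
--         distance = abs(current_frame - frame)
--         if distance < min_distance:
--             min_distance = distance
--             nearest = frame
--
--     return nearest
-- ===== SOURCE B (Python) =====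
-- def _find_nearest_processed_frame(
--     current_frame: int, processed_frames: list
-- ) -> int:
--     """Find the nearest processed frame: sort, binary-search the insertion
--     point, then compare only the two neighbouring candidates (tie -> smaller)."""
--     if not processed_frames:
--         return current_frame
--     s = sorted(processed_frames)
--     # bisect_left by hand (A's module imports nothing, so no bisect import)
--     lo, hi = 0, len(s)
--     while lo < hi:
--         mid = (lo + hi) // 2
--         if s[mid] < current_frame:
--             lo = mid + 1
--         else:
--             hi = mid
--     i = lo
--     if i == 0:
--         return s[0]
--     if i == len(s):
--         return s[i - 1]
--     a, b = s[i - 1], s[i]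
--     return a if current_frame - a <= b - current_frame else b
-- ===== Notes on version B (the rewrite author's own statement) =====
-- stated objective: alternative
-- what changed: Replaces A's full scan of the sorted list (tracking a running min_distance) by a binary search for the insertion point of current_frame followed by an O(1) comparison of only the two neighbouring candidates (tie broken to the smaller frame).
import Mathlib
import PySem

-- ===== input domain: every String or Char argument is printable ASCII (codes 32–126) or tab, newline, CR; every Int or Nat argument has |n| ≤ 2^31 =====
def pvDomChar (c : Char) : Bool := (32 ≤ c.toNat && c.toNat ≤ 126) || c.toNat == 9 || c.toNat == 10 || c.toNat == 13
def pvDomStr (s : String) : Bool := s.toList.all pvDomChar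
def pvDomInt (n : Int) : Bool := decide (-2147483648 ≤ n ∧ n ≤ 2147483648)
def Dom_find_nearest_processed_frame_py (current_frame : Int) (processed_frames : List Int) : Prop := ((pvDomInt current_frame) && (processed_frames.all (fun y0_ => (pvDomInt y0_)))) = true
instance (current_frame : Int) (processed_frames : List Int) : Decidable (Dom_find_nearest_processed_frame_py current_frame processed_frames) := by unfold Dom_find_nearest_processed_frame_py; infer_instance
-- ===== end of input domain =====

-- B replaces A's full scan of the sorted list by a binary search for the insertion point of
-- current_frame plus an O(1) comparison of the two neighbouring candidates (tie -> smaller frame).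

-- ===== PORT A =====
def find_nearest_processed_frame_py (current_frame : Int) (processed_frames : List Int) : Int :=
  if processed_frames = [] then current_frame
  else
    let s := PySem.List.sorted processed_frames (fun x => x) false
    let nearest := s.headI
    let min_distance := |current_frame - nearest|
    let st := s.foldl (fun (st : Int × Int) frame =>
      let distance := |current_frame - frame|
      if distance < st.2 then (frame, distance) else st) (nearest, min_distance)
    st.1

-- ===== PORT B =====
-- the hand-written bisect_left while-loop of Source B, step for step (the list index s[mid]
-- is always in range when called as in Source B, so getD's default is never used)
def pvBisect (c : Int) (s : List Int) (lo hi : Nat) : Nat :=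
  if h : lo < hi then
    let mid := (lo + hi) / 2
    if s.getD mid 0 < c then pvBisect c s (mid + 1) hi else pvBisect c s lo mid
  else lo
termination_by hi - lo
decreasing_by all_goals omega

def find_nearest_processed_frame_py_alt (current_frame : Int) (processed_frames : List Int) : Int :=
  if processed_frames = [] then current_frame
  else
    let s := PySem.List.sorted processed_frames (fun x => x) false
    let i := pvBisect current_frame s 0 s.length
    if i = 0 then s.getD 0 0
    else if i = s.length then s.getD (i - 1) 0
    else if current_frame - s.getD (i - 1) 0 ≤ s.getD i 0 - current_frame then s.getD (i - 1) 0
    else s.getD i 0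

-- ===== PRECONDITION & SPEC =====
def Spec_find_nearest_processed_frame_py (current_frame : Int) (processed_frames : List Int) (out : Int) : Prop := out = find_nearest_processed_frame_py_alt current_frame processed_frames
instance (current_frame : Int) (processed_frames : List Int) (out : Int) : Decidable (Spec_find_nearest_processed_frame_py current_frame processed_frames out) := by unfold Spec_find_nearest_processed_frame_py; infer_instance

-- ===== CLAIM (what is proved, stated in full; the proofs are below) =====
def Claim_equal_find_nearest_processed_frame_py : Prop := ∀ (current_frame : Int) (processed_frames : List Int), Dom_find_nearest_processed_frame_py current_frame processed_frames → Spec_find_nearest_processed_frame_py current_frame processed_frames (find_nearest_processed_frame_py current_frame processed_frames)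

-- ===== LEMMAS AND PROOFS =====

-- lexicographic "key ≤" on frames, key f = (|c - f|, f)
def keyLe (c a b : Int) : Prop :=
  |c - a| < |c - b| ∨ (|c - a| = |c - b| ∧ a ≤ b)

theorem keyLe_refl (c a : Int) : keyLe c a a := Or.inr ⟨rfl, le_refl a⟩

theorem keyLe_trans {c a b d : Int} (h1 : keyLe c a b) (h2 : keyLe c b d) : keyLe c a d := by
  unfold keyLe at *; omega

theorem keyLe_antisymm {c a b : Int} (h1 : keyLe c a b) (h2 : keyLe c b a) : a = b := by
  unfold keyLe at *; omega


theorem keyLe_geq {c a y : Int} (h1 : c ≤ a) (h2 : a ≤ y) : keyLe c a y := by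
  unfold keyLe
  rw [abs_of_nonpos (by omega : c - a ≤ 0), abs_of_nonpos (by omega : c - y ≤ 0)]
  omega

theorem keyLe_leq {c a y : Int} (h1 : a < c) (h2 : y ≤ a) : keyLe c a y := by
  unfold keyLe
  rw [abs_of_nonneg (by omega : (0:Int) ≤ c - a), abs_of_nonneg (by omega : (0:Int) ≤ c - y)]
  omega

theorem keyLe_mid_a {c a b y : Int} (ha : a < c) (hb : c ≤ b) (hby : b ≤ y)
    (hcond : c - a ≤ b - c) : keyLe c a y := by
  unfold keyLe
  rw [abs_of_nonneg (by omega : (0:Int) ≤ c - a), abs_of_nonpos (by omega : c - y ≤ 0)]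
  omega

theorem keyLe_mid_b {c a b y : Int} (ha : a < c) (hb : c ≤ b) (hya : y ≤ a)
    (hcond : ¬ c - a ≤ b - c) : keyLe c b y := by
  unfold keyLe
  rw [abs_of_nonpos (by omega : c - b ≤ 0), abs_of_nonneg (by omega : (0:Int) ≤ c - y)]
  omega

theorem getD_mem (s : List Int) (j : Nat) (h : j < s.length) : s.getD j 0 ∈ s := by
  rw [List.getD_eq_getElem _ _ h]; exact List.getElem_mem h

theorem getD_mono (s : List Int) (hp : s.Pairwise (· ≤ ·)) (j k : Nat)
    (hjk : j ≤ k) (hk : k < s.length) : s.getD j 0 ≤ s.getD k 0 := by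
  rw [List.getD_eq_getElem _ _ (lt_of_le_of_lt hjk hk), List.getD_eq_getElem _ _ hk]
  rcases Nat.lt_or_eq_of_le hjk with h | h
  · exact (List.pairwise_iff_getElem.mp hp) j k _ _ h
  · subst h; rfl

-- the binary search returns the first index whose element is ≥ c (within [lo, hi])
theorem pvBisect_spec (c : Int) (s : List Int) (hp : s.Pairwise (· ≤ ·)) :
    ∀ (n lo hi : Nat), hi - lo ≤ n → hi ≤ s.length → lo ≤ hi →
    (∀ j, j < lo → s.getD j 0 < c) →
    (∀ j, hi ≤ j → j < s.length → c ≤ s.getD j 0) →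
    lo ≤ pvBisect c s lo hi ∧ pvBisect c s lo hi ≤ hi ∧
    (∀ j, j < pvBisect c s lo hi → s.getD j 0 < c) ∧
    (∀ j, pvBisect c s lo hi ≤ j → j < s.length → c ≤ s.getD j 0) := by
  intro n
  induction n with
  | zero =>
    intro lo hi hn hhi hlohi hlow hhigh
    have : lo = hi := by omega
    rw [pvBisect, dif_neg (by omega)]
    exact ⟨le_refl _, by omega, hlow, fun j hj => hhigh j (by omega)⟩
  | succ n ih =>
    intro lo hi hn hhi hlohi hlow hhigh
    rw [pvBisect]
    by_cases h : lo < hi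
    · rw [dif_pos h]
      simp only
      have hmidlo : lo ≤ (lo + hi) / 2 := by omega
      have hmidhi : (lo + hi) / 2 < hi := by omega
      by_cases hc : s.getD ((lo + hi) / 2) 0 < c
      · rw [if_pos hc]
        have := ih ((lo + hi) / 2 + 1) hi (by omega) hhi (by omega)
          (fun j hj => by
            rcases Nat.lt_or_ge j lo with h' | h'
            · exact hlow j h'
            · exact lt_of_le_of_lt
                (getD_mono s hp j ((lo + hi) / 2) (by omega) (by omega)) hc)
          hhigh
        exact ⟨le_trans (by omega) this.1, this.2.1, this.2.2.1, this.2.2.2⟩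
      · rw [if_neg hc]
        have := ih lo ((lo + hi) / 2) (by omega) (by omega) (by omega) hlow
          (fun j hj hjlen => le_trans (by omega)
            (getD_mono s hp ((lo + hi) / 2) j hj hjlen))
        exact ⟨this.1, by omega, this.2.2.1, this.2.2.2⟩
    · rw [dif_neg h]
      exact ⟨le_refl _, by omega, hlow, fun j hj hjlen => hhigh j (by omega) hjlen⟩

-- B's candidate selection is keyLe-minimal over the sorted list
theorem bval_min (c : Int) (s : List Int) (hp : s.Pairwise (· ≤ ·)) (hlen : 0 < s.length) :
    (if pvBisect c s 0 s.length = 0 then s.getD 0 0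
     else if pvBisect c s 0 s.length = s.length then s.getD (pvBisect c s 0 s.length - 1) 0
     else if c - s.getD (pvBisect c s 0 s.length - 1) 0 ≤ s.getD (pvBisect c s 0 s.length) 0 - c
       then s.getD (pvBisect c s 0 s.length - 1) 0
       else s.getD (pvBisect c s 0 s.length) 0) ∈ s ∧
    ∀ j, j < s.length → keyLe c
      (if pvBisect c s 0 s.length = 0 then s.getD 0 0
       else if pvBisect c s 0 s.length = s.length then s.getD (pvBisect c s 0 s.length - 1) 0
       else if c - s.getD (pvBisect c s 0 s.length - 1) 0 ≤ s.getD (pvBisect c s 0 s.length) 0 - c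
         then s.getD (pvBisect c s 0 s.length - 1) 0
         else s.getD (pvBisect c s 0 s.length) 0) (s.getD j 0) := by
  obtain ⟨_, hile, hlt, hge⟩ := pvBisect_spec c s hp s.length 0 s.length (by omega) (le_refl _)
    (by omega) (fun j hj => absurd hj (Nat.not_lt_zero j)) (fun j hj hj' => absurd hj' (by omega))
  set i := pvBisect c s 0 s.length with hi
  by_cases h0 : i = 0
  · rw [if_pos h0]
    refine ⟨getD_mem s 0 hlen, fun j hj => ?_⟩
    exact keyLe_geq (hge 0 (by omega) hlen) (getD_mono s hp 0 j (by omega) hj)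
  · rw [if_neg h0]
    by_cases hL : i = s.length
    · rw [if_pos hL]
      refine ⟨getD_mem s (i - 1) (by omega), fun j hj => ?_⟩
      exact keyLe_leq (hlt (i - 1) (by omega)) (getD_mono s hp j (i - 1) (by omega) (by omega))
    · rw [if_neg hL]
      have ha : s.getD (i - 1) 0 < c := hlt (i - 1) (by omega)
      have hb : c ≤ s.getD i 0 := hge i (le_refl _) (by omega)
      have hyfacts : ∀ j, j < s.length →
          (j < i ∧ s.getD j 0 ≤ s.getD (i - 1) 0 ∧ s.getD j 0 < c) ∨
          (i ≤ j ∧ s.getD i 0 ≤ s.getD j 0 ∧ c ≤ s.getD j 0) := by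
        intro j hj
        rcases Nat.lt_or_ge j i with h' | h'
        · exact Or.inl ⟨h', getD_mono s hp j (i - 1) (by omega) (by omega), hlt j h'⟩
        · exact Or.inr ⟨h', getD_mono s hp i j h' hj, hge j h' hj⟩
      by_cases hcmp : c - s.getD (i - 1) 0 ≤ s.getD i 0 - c
      · rw [if_pos hcmp]
        refine ⟨getD_mem s (i - 1) (by omega), fun j hj => ?_⟩
        rcases hyfacts j hj with ⟨_, h2, h3⟩ | ⟨_, h2, h3⟩
        · exact keyLe_leq ha h2
        · exact keyLe_mid_a ha hb h2 hcmp
      · rw [if_neg hcmp]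
        refine ⟨getD_mem s i (by omega), fun j hj => ?_⟩
        rcases hyfacts j hj with ⟨_, h2, h3⟩ | ⟨_, h2, h3⟩
        · exact keyLe_mid_b ha hb h2 hcmp
        · exact keyLe_geq hb h2

-- A's fold over the sorted list returns a keyLe-minimal element
theorem aFold_min (c : Int) : ∀ (xs : List Int) (x : Int),
    xs.Pairwise (· ≤ ·) → (∀ y ∈ xs, x ≤ y) →
    (xs.foldl (fun (st : Int × Int) frame =>
        if |c - frame| < st.2 then (frame, |c - frame|) else st) (x, |c - x|)).1 ∈ x :: xs ∧
    ∀ y ∈ x :: xs, keyLe c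
      (xs.foldl (fun (st : Int × Int) frame =>
        if |c - frame| < st.2 then (frame, |c - frame|) else st) (x, |c - x|)).1 y := by
  intro xs
  induction xs with
  | nil =>
    intro x _ _
    refine ⟨List.mem_singleton.mpr rfl, ?_⟩
    intro y hy
    rw [List.mem_singleton.mp hy]
    exact keyLe_refl c x
  | cons f rest ih =>
    intro x hs hle
    have hxf : x ≤ f := hle f List.mem_cons_self
    have hfr : ∀ y ∈ rest, f ≤ y := (List.pairwise_cons.mp hs).1
    have hsr : rest.Pairwise (· ≤ ·) := (List.pairwise_cons.mp hs).2
    simp only [List.foldl_cons]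
    by_cases hlt : |c - f| < |c - x|
    · rw [if_pos hlt]
      obtain ⟨hmem, hmin⟩ := ih f hsr hfr
      refine ⟨?_, ?_⟩
      · rcases List.mem_cons.mp hmem with h | h
        · rw [h]; exact List.mem_cons_of_mem _ List.mem_cons_self
        · exact List.mem_cons_of_mem _ (List.mem_cons_of_mem _ h)
      · intro y hy
        rcases List.mem_cons.mp hy with h | hy'
        · rw [h]
          refine keyLe_trans (hmin f List.mem_cons_self) ?_
          unfold keyLe; omega
        · exact hmin y hy'
    · rw [if_neg hlt]
      obtain ⟨hmem, hmin⟩ := ih x hsr (fun y hy => hxf.trans (hfr y hy))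
      refine ⟨?_, ?_⟩
      · rcases List.mem_cons.mp hmem with h | h
        · rw [h]; exact List.mem_cons_self
        · exact List.mem_cons_of_mem _ (List.mem_cons_of_mem _ h)
      · intro y hy
        rcases List.mem_cons.mp hy with h | hy'
        · rw [h]; exact hmin x List.mem_cons_self
        · rcases List.mem_cons.mp hy' with h2 | hy''
          · rw [h2]
            refine keyLe_trans (hmin x List.mem_cons_self) ?_
            unfold keyLe; omega
          · exact hmin y (List.mem_cons_of_mem _ hy'')

-- ===== VERDICT (by name: the statement is the Claim_ definition above) =====
theorem find_nearest_processed_frame_py_spec : Claim_equal_find_nearest_processed_frame_py := by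
  intro c pf _
  unfold Spec_find_nearest_processed_frame_py find_nearest_processed_frame_py find_nearest_processed_frame_py_alt
  match hpf : pf with
  | [] => simp
  | x :: xs =>
    rw [if_neg (by simp), if_neg (by simp)]
    have hperm : (PySem.List.sorted (x :: xs) (fun x => x) false).Perm (x :: xs) :=
      PySem.List.sorted_perm (x :: xs) (fun x => x) false
    have hpw : (PySem.List.sorted (x :: xs) (fun x => x) false).Pairwise (· ≤ ·) := by
      simpa using PySem.List.sorted_pairwise (x :: xs) (fun x => x)
    have hlen : 0 < (PySem.List.sorted (x :: xs) (fun x => x) false).length := by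
      rw [hperm.length_eq]; simp
    obtain ⟨hBmem, hBmin⟩ := bval_min c _ hpw hlen
    match hs : PySem.List.sorted (x :: xs) (fun x => x) false with
    | [] => rw [hs] at hlen; simp at hlen
    | m :: t =>
      rw [hs] at hBmem hBmin hpw
      simp only [List.headI]
      have hmt : ∀ y ∈ t, m ≤ y := (List.pairwise_cons.mp hpw).1
      obtain ⟨hAmem, hAmin⟩ := aFold_min c (m :: t) m hpw (fun y hy => by
        rcases List.mem_cons.mp hy with rfl | hy'
        · exact le_refl _
        · exact hmt y hy')
      -- A's result is a member of m :: t
      have hAmem' : (List.foldl (fun (st : Int × Int) frame =>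
          if |c - frame| < st.2 then (frame, |c - frame|) else st) (m, |c - m|) (m :: t)).1
          ∈ m :: t := by
        rcases List.mem_cons.mp hAmem with h | h
        · rw [h]; exact List.mem_cons_self
        · exact h
      -- index the A-result to use hBmin
      obtain ⟨j, hj, hjv⟩ := List.mem_iff_getElem.mp hAmem'
      have hkBA := hBmin j hj
      rw [List.getD_eq_getElem _ _ hj, hjv] at hkBA
      have hkAB := hAmin _ (List.mem_cons_of_mem _ hBmem)
      exact keyLe_antisymm hkAB hkBA
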